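-- pv_equiv track=rewrite | github.com/jayeshbhandarkar/Codeforces | Count_Good_Numbers.py | calculate_good
-- ===== SOURCE A (Python) =====
-- def calculate_good(N):
--     if N == 0:
--         return 0
--
--     primes = [2, 3, 5, 7]
--     total_good = N
--
--     for i in range(1, 1 << len(primes)):
--         product = 1
--         num_set_bits = 0
--
--         for j in range(len(primes)):
--             if (i >> j) & 1:
--                 product *= primes[j]
--                 num_set_bits += 1
--
--         if num_set_bits % 2 == 1:
--             total_good -= (N // product)
--         else:
--             total_good += (N // product)
--
--     return total_good
-- ===== SOURCE B (Python) =====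
-- def calculate_good(N):
--     # Divisibility by 2,3,5,7 is periodic with period 210; 48 of each 210 are good.
--     q, r = divmod(N, 210)
--     count = 0
--     for i in range(1, r + 1):
--         if i % 2 and i % 3 and i % 5 and i % 7:
--             count += 1
--     return 48 * q + count
-- ===== Notes on version B (the rewrite author's own statement) =====
-- stated objective: alternative
-- what changed: Replaced the subset inclusion-exclusion over the four primes (a bitmask loop of floor divisions) with the periodicity of divisibility modulo their lcm: one divmod gives the number of full periods, each contributing a fixed count, plus a direct modular count over the remainder.
import Mathlib
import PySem

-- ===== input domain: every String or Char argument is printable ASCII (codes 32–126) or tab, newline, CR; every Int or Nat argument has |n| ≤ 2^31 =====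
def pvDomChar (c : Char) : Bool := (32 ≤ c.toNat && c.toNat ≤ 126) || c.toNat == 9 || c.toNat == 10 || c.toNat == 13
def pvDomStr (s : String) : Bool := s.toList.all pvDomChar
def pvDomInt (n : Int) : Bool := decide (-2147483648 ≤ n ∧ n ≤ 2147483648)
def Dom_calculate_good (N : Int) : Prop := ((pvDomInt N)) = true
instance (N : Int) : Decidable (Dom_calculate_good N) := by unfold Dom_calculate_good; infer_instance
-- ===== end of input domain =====

-- B replaces A's subset inclusion-exclusion by the period-210 structure of divisibility by 2,3,5,7
-- (48 good numbers per block of 210, plus a counted remainder); objective: alternative algorithm.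

-- ===== PORT A =====
def calculate_good (N : Int) : Int :=
  if N = 0 then 0
  else
    let primes : List Int := [2, 3, 5, 7]
    (PySem.List.pyRange 1 (1 <<< primes.length) 1).foldl (fun total_good i =>
      let pb := (PySem.List.enumerate primes).foldl
        (fun (pb : Int × Int) jp =>
          if PySem.Int.band (i >>> jp.1.toNat) 1 ≠ 0 then (pb.1 * jp.2, pb.2 + 1) else pb)
        (1, 0)
      if PySem.Int.mod pb.2 2 = 1 then total_good - PySem.Int.floordiv N pb.1
      else total_good + PySem.Int.floordiv N pb.1) N

-- ===== PORT B =====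
def calculate_good_alt (N : Int) : Int :=
  let q := PySem.Int.floordiv N 210
  let r := PySem.Int.mod N 210
  let count := (PySem.List.pyRange 1 (r + 1) 1).foldl
    (fun count i =>
      if PySem.Int.mod i 2 ≠ 0 ∧ PySem.Int.mod i 3 ≠ 0 ∧ PySem.Int.mod i 5 ≠ 0 ∧ PySem.Int.mod i 7 ≠ 0
      then count + 1 else count) 0
  48 * q + count

-- ===== PRECONDITION & SPEC =====
def Spec_calculate_good (N : Int) (out : Int) : Prop := out = calculate_good_alt N
instance (N : Int) (out : Int) : Decidable (Spec_calculate_good N out) := by unfold Spec_calculate_good; infer_instance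

-- ===== CLAIM (what is proved, stated in full; the proofs are below) =====
def Claim_equal_calculate_good : Prop := ∀ (N : Int), Dom_calculate_good N → Spec_calculate_good N (calculate_good N)

-- ===== LEMMAS AND PROOFS =====

-- A's inclusion-exclusion fold, written out (terms in A's iteration order i = 1 .. 15)
def pvClosed (r : Int) : Int :=
  r - PySem.Int.floordiv r 2 - PySem.Int.floordiv r 3 + PySem.Int.floordiv r 6
    - PySem.Int.floordiv r 5 + PySem.Int.floordiv r 10 + PySem.Int.floordiv r 15
    - PySem.Int.floordiv r 30 - PySem.Int.floordiv r 7 + PySem.Int.floordiv r 14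
    + PySem.Int.floordiv r 21 - PySem.Int.floordiv r 42 + PySem.Int.floordiv r 35
    - PySem.Int.floordiv r 70 - PySem.Int.floordiv r 105 + PySem.Int.floordiv r 210

-- B's remainder loop, named for the proofs (definitionally the fold inside calculate_good_alt)
def pvCount (r : Int) : Int :=
  (PySem.List.pyRange 1 (r + 1) 1).foldl
    (fun count i =>
      if PySem.Int.mod i 2 ≠ 0 ∧ PySem.Int.mod i 3 ≠ 0 ∧ PySem.Int.mod i 5 ≠ 0 ∧ PySem.Int.mod i 7 ≠ 0
      then count + 1 else count) 0

lemma calculate_good_closed (N : Int) : calculate_good N = pvClosed N := by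
  by_cases h : N = 0
  · subst h; decide
  · unfold calculate_good
    rw [if_neg h]
    rfl

lemma fd_split (q r p k : Int) (hp : p ≠ 0) (hk : p * k = 210) :
    PySem.Int.floordiv (q * 210 + r) p = PySem.Int.floordiv r p + q * k := by
  have h : q * 210 + r = r + (q * k) * p := by rw [← hk]; ring
  show (q * 210 + r).fdiv p = r.fdiv p + q * k
  rw [h]
  exact Int.add_mul_fdiv_right r (q * k) hp

set_option maxRecDepth 8192 in
lemma base_fin : ∀ m : Fin 210, pvClosed (m.1 : Int) = pvCount (m.1 : Int) := by decide

lemma base (r : Int) (h0 : 0 ≤ r) (h1 : r < 210) : pvClosed r = pvCount r := by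
  lift r to ℕ using h0 with n
  have hn : n < 210 := by exact_mod_cast h1
  exact base_fin ⟨n, hn⟩

lemma main_eq (N : Int) : calculate_good N = calculate_good_alt N := by
  rw [calculate_good_closed]
  have halt : calculate_good_alt N
      = 48 * PySem.Int.floordiv N 210 + pvCount (PySem.Int.mod N 210) := rfl
  rw [halt]
  have hsplit := PySem.Int.floordiv_mul_add_mod N 210
  have h0 : (0:Int) ≤ PySem.Int.mod N 210 := PySem.Int.mod_nonneg N (by norm_num)
  have h1 : PySem.Int.mod N 210 < 210 := PySem.Int.mod_lt N (by norm_num)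
  generalize hq : PySem.Int.floordiv N 210 = q at *
  generalize hr : PySem.Int.mod N 210 = r at *
  rw [← hsplit]
  unfold pvClosed
  rw [fd_split q r 2 105 (by norm_num) (by norm_num),
      fd_split q r 3 70 (by norm_num) (by norm_num),
      fd_split q r 6 35 (by norm_num) (by norm_num),
      fd_split q r 5 42 (by norm_num) (by norm_num),
      fd_split q r 10 21 (by norm_num) (by norm_num),
      fd_split q r 15 14 (by norm_num) (by norm_num),
      fd_split q r 30 7 (by norm_num) (by norm_num),
      fd_split q r 7 30 (by norm_num) (by norm_num),
      fd_split q r 14 15 (by norm_num) (by norm_num),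
      fd_split q r 21 10 (by norm_num) (by norm_num),
      fd_split q r 42 5 (by norm_num) (by norm_num),
      fd_split q r 35 6 (by norm_num) (by norm_num),
      fd_split q r 70 3 (by norm_num) (by norm_num),
      fd_split q r 105 2 (by norm_num) (by norm_num),
      fd_split q r 210 1 (by norm_num) (by norm_num)]
  have hb := base r h0 h1
  unfold pvClosed at hb
  linarith

-- ===== VERDICT (by name: the statement is the Claim_ definition above) =====
theorem calculate_good_spec : Claim_equal_calculate_good := by
  intro N _
  unfold Spec_calculate_good
  exact main_eq N
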